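-- pv_equiv track=rewrite | github.com/project-team-m/labs6sem | ivan/evr/lab3/main.py | find
-- ===== SOURCE A (Python) =====
-- def find(mass):
--     sums = []
--     for i in mass:
--         sums.append(sum(i))
--     Tmax = max(sums)
--     for i in mass:
--         if Tmax == sum(i):
--             Tmax = i
--             break
--
--     Tmin = min(sums)
--     for i in mass:
--         if Tmin == sum(i):
--             Tmin = i
--             break
--     return Tmin, Tmax, sum(Tmax) - sum(Tmin)
-- ===== SOURCE B (Python) =====
-- def find(mass):
--     if not mass:
--         raise ValueError("find() arg is an empty sequence")
--     first = mass[0]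
--     s0 = sum(first)
--     best_min_row, best_min_sum = first, s0
--     best_max_row, best_max_sum = first, s0
--     for row in mass[1:]:
--         s = sum(row)
--         if s > best_max_sum:
--             best_max_row, best_max_sum = row, s
--         if s < best_min_sum:
--             best_min_row, best_min_sum = row, s
--     return best_min_row, best_max_row, best_max_sum - best_min_sum
-- ===== Notes on version B (the rewrite author's own statement) =====
-- stated objective: alternative
-- what changed: Replaces A's build-a-sums-list plus max(), min() and two extra first-match scans (each re-summing every row) with a single pass that maintains running first-min/first-max rows and their sums, summing each row exactly once.
import Mathlib
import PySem

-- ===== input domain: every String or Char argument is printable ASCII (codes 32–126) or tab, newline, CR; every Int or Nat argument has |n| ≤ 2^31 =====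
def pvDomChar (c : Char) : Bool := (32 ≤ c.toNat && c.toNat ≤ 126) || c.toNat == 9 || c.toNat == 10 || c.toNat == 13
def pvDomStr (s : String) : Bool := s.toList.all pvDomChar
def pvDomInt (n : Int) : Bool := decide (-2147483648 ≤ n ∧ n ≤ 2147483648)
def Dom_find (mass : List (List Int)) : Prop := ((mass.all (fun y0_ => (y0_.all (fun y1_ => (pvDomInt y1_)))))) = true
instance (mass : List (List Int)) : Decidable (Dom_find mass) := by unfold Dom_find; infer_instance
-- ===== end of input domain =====

-- B replaces A's sums-list + max()/min() + two first-match rescans (re-summing rows) with one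
-- pass keeping running first-min/first-max rows and sums (alternative decomposition, same cost).

-- ===== PORT A =====
-- A's 'for i in mass: if T == sum(i): T = i; break' loop
def findRow : List (List Int) → Int → Option (List Int)
  | [], _ => none
  | i :: rest, t => if t = i.sum then some i else findRow rest t

def find (mass : List (List Int)) : List Int × List Int × Int :=
  let sums := mass.foldl (fun acc i => acc ++ [i.sum]) []
  match PySem.List.max? sums (fun x => x), PySem.List.min? sums (fun x => x) with
  | some tmax, some tmin =>
      let Tmax := (findRow mass tmax).getD []   -- the break always fires on Pre_; getD [] is unreachable
      let Tmin := (findRow mass tmin).getD []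
      (Tmin, Tmax, Tmax.sum - Tmin.sum)
  | _, _ => ([], [], 0)                         -- mass = []: Python raises ValueError (outside Pre_)

-- ===== PORT B =====
-- one step of B's loop: state = ((best_min_row, best_min_sum), (best_max_row, best_max_sum))
def stepB (st : (List Int × Int) × (List Int × Int)) (row : List Int) : (List Int × Int) × (List Int × Int) :=
  let s := row.sum
  let st1 := if s > st.2.2 then (st.1, (row, s)) else st
  if s < st1.1.2 then ((row, s), st1.2) else st1

def find_alt (mass : List (List Int)) : List Int × List Int × Int :=
  match mass with
  | [] => ([], [], 0)                           -- Python B raises ValueError here (outside Pre_)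
  | first :: rest =>
      let s0 := first.sum
      let st := rest.foldl stepB ((first, s0), (first, s0))
      (st.1.1, st.2.1, st.2.2 - st.1.2)

-- ===== PRECONDITION & SPEC =====
-- A raises ValueError (max of empty sequence) on mass = []; B raises ValueError there too.
def Pre_find (mass : List (List Int)) : Prop := mass ≠ []
instance (mass : List (List Int)) : Decidable (Pre_find mass) := by unfold Pre_find; infer_instance

def pvWitness_find : List (List Int) := [[1, 2], [3], []]

def Spec_find (mass : List (List Int)) (out : List Int × List Int × Int) : Prop := out = find_alt mass
instance (mass : List (List Int)) (out : List Int × List Int × Int) : Decidable (Spec_find mass out) := by unfold Spec_find; infer_instance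

-- ===== CLAIM (what is proved, stated in full; the proofs are below) =====
def Claim_equal_find : Prop := ∀ (mass : List (List Int)), Dom_find mass → Pre_find mass → Spec_find mass (find mass)

-- ===== LEMMAS AND PROOFS =====

-- running min / max of the sums of a :: t
def mnS (a : List Int) (t : List (List Int)) : Int := (t.map List.sum).foldl min a.sum
def mxS (a : List Int) (t : List (List Int)) : Int := (t.map List.sum).foldl max a.sum

def stateB (a : List Int) (t : List (List Int)) : (List Int × Int) × (List Int × Int) :=
  (((findRow (a :: t) (mnS a t)).getD [], mnS a t), ((findRow (a :: t) (mxS a t)).getD [], mxS a t))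

theorem sums_build (l : List (List Int)) (acc : List Int) :
    l.foldl (fun acc i => acc ++ [i.sum]) acc = acc ++ l.map List.sum := by
  induction l generalizing acc with
  | nil => simp
  | cons x xs ih => simp [List.foldl, ih]

theorem findRow_none_iff (l : List (List Int)) (v : Int) :
    findRow l v = none ↔ ∀ r ∈ l, v ≠ r.sum := by
  induction l with
  | nil => simp [findRow]
  | cons x xs ih =>
    by_cases h : v = x.sum <;> simp [findRow, h, ih]

theorem findRow_some_sum (l : List (List Int)) (v : Int) (r : List Int)
    (h : findRow l v = some r) : r.sum = v := by
  induction l with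
  | nil => simp [findRow] at h
  | cons x xs ih =>
    by_cases hx : v = x.sum
    · simp [findRow, hx] at h; subst h; exact hx.symm
    · simp [findRow, hx] at h; exact ih h

theorem findRow_append (l₁ l₂ : List (List Int)) (v : Int) :
    findRow (l₁ ++ l₂) v = ((findRow l₁ v).orElse (fun _ => findRow l₂ v)) := by
  induction l₁ with
  | nil => simp [findRow]
  | cons x xs ih =>
    by_cases hx : v = x.sum <;> simp [findRow, hx, ih]

theorem findRow_attains_min (a : List Int) (t : List (List Int)) :
    ∃ r, findRow (a :: t) (mnS a t) = some r := by
  rcases (PySem.List.foldl_min_mem (t.map List.sum) a.sum) with h | h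
  · -- the min is a.sum
    refine ⟨a, ?_⟩; simp [findRow, mnS, h]
  · -- the min is the sum of some row of t
    rcases List.mem_map.mp h with ⟨r, hr, hrs⟩
    cases hf : findRow (a :: t) (mnS a t) with
    | some r' => exact ⟨r', rfl⟩
    | none =>
      have hne := (findRow_none_iff (a :: t) (mnS a t)).mp hf r (by simp [hr])
      exact absurd (by rw [mnS]; exact hrs.symm : mnS a t = r.sum) hne

theorem findRow_attains_max (a : List Int) (t : List (List Int)) :
    ∃ r, findRow (a :: t) (mxS a t) = some r := by
  rcases (PySem.List.foldl_max_mem (t.map List.sum) a.sum) with h | h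
  · refine ⟨a, ?_⟩; simp [findRow, mxS, h]
  · rcases List.mem_map.mp h with ⟨r, hr, hrs⟩
    cases hf : findRow (a :: t) (mxS a t) with
    | some r' => exact ⟨r', rfl⟩
    | none =>
      have hne := (findRow_none_iff (a :: t) (mxS a t)).mp hf r (by simp [hr])
      exact absurd (by rw [mxS]; exact hrs.symm : mxS a t = r.sum) hne

theorem mnS_snoc (a : List Int) (t : List (List Int)) (row : List Int) :
    mnS a (t ++ [row]) = min (mnS a t) row.sum := by
  simp [mnS, List.foldl_append]

theorem mxS_snoc (a : List Int) (t : List (List Int)) (row : List Int) :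
    mxS a (t ++ [row]) = max (mxS a t) row.sum := by
  simp [mxS, List.foldl_append]

theorem mnS_le (a : List Int) (t : List (List Int)) :
    mnS a t ≤ a.sum ∧ ∀ r ∈ t, mnS a t ≤ r.sum := by
  have h := PySem.List.foldl_min_le (t.map List.sum) a.sum
  exact ⟨h.1, fun r hr => h.2 r.sum (List.mem_map.mpr ⟨r, hr, rfl⟩)⟩

theorem le_mxS (a : List Int) (t : List (List Int)) :
    a.sum ≤ mxS a t ∧ ∀ r ∈ t, r.sum ≤ mxS a t := by
  have h := PySem.List.le_foldl_max (t.map List.sum) a.sum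
  exact ⟨h.1, fun r hr => h.2 r.sum (List.mem_map.mpr ⟨r, hr, rfl⟩)⟩

theorem stepB_state (a : List Int) (t : List (List Int)) (row : List Int) :
    stepB (stateB a t) row = stateB a (t ++ [row]) := by
  have hmin := mnS_le a t
  have hmax := le_mxS a t
  have hmm : mnS a t ≤ mxS a t := le_trans hmin.1 hmax.1
  -- the four row components via findRow on the extended list
  have hcons : a :: (t ++ [row]) = (a :: t) ++ [row] := by simp
  by_cases hgt : row.sum > mxS a t
  · -- new max; min unchanged (row.sum > mxS ≥ mnS)
    have hnlt : ¬ row.sum < mnS a t := by omega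
    have hmx' : mxS a (t ++ [row]) = row.sum := by rw [mxS_snoc]; omega
    have hmn' : mnS a (t ++ [row]) = mnS a t := by rw [mnS_snoc]; omega
    have hnoneMax : findRow (a :: t) row.sum = none := by
      rw [findRow_none_iff]
      intro r hr
      rcases List.mem_cons.mp hr with h | h
      · subst h; omega
      · have := hmax.2 r h; omega
    obtain ⟨rm, hrm⟩ := findRow_attains_min a t
    have h1 : findRow (a :: (t ++ [row])) (mnS a t) = some rm := by
      rw [hcons, findRow_append, hrm]; rfl
    have h2 : findRow (a :: (t ++ [row])) row.sum = some row := by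
      rw [hcons, findRow_append, hnoneMax]; simp [findRow]
    simp [stepB, stateB, hgt, hnlt, hmx', hmn', h1, h2, hrm]
  · by_cases hlt : row.sum < mnS a t
    · -- new min; max unchanged
      have hmx' : mxS a (t ++ [row]) = mxS a t := by rw [mxS_snoc]; omega
      have hmn' : mnS a (t ++ [row]) = row.sum := by rw [mnS_snoc]; omega
      have hnoneMin : findRow (a :: t) row.sum = none := by
        rw [findRow_none_iff]
        intro r hr
        rcases List.mem_cons.mp hr with h | h
        · subst h; omega
        · have := hmin.2 r h; omega
      obtain ⟨rM, hrM⟩ := findRow_attains_max a t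
      have h1 : findRow (a :: (t ++ [row])) row.sum = some row := by
        rw [hcons, findRow_append, hnoneMin]; simp [findRow]
      have h2 : findRow (a :: (t ++ [row])) (mxS a t) = some rM := by
        rw [hcons, findRow_append, hrM]; rfl
      simp [stepB, stateB, hgt, hlt, hmx', hmn', h1, h2, hrM]
    · -- neither changes
      have hmx' : mxS a (t ++ [row]) = mxS a t := by rw [mxS_snoc]; omega
      have hmn' : mnS a (t ++ [row]) = mnS a t := by rw [mnS_snoc]; omega
      obtain ⟨rm, hrm⟩ := findRow_attains_min a t
      obtain ⟨rM, hrM⟩ := findRow_attains_max a t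
      have h1 : findRow (a :: (t ++ [row])) (mnS a t) = some rm := by
        rw [hcons, findRow_append, hrm]; rfl
      have h2 : findRow (a :: (t ++ [row])) (mxS a t) = some rM := by
        rw [hcons, findRow_append, hrM]; rfl
      simp [stepB, stateB, hgt, hlt, hmx', hmn', h1, h2, hrm, hrM]

theorem loop_inv (rest : List (List Int)) (a : List Int) (t : List (List Int)) :
    rest.foldl stepB (stateB a t) = stateB a (t ++ rest) := by
  induction rest generalizing t with
  | nil => simp
  | cons row rest ih =>
    have : (t ++ [row]) ++ rest = t ++ row :: rest := by simp
    calc (row :: rest).foldl stepB (stateB a t)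
        = rest.foldl stepB (stepB (stateB a t) row) := rfl
      _ = rest.foldl stepB (stateB a (t ++ [row])) := by rw [stepB_state]
      _ = stateB a (t ++ row :: rest) := by rw [ih, this]

theorem stateB_nil (a : List Int) : stateB a [] = ((a, a.sum), (a, a.sum)) := by
  have h1 : mnS a [] = a.sum := rfl
  have h2 : mxS a [] = a.sum := rfl
  simp [stateB, h1, h2, findRow]

-- ===== VERDICT (by name: the statement is the Claim_ definition above) =====
theorem find_spec : Claim_equal_find := by
  intro mass _ hpre
  unfold Spec_find
  match mass with
  | [] => exact absurd rfl hpre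
  | a :: t =>
    obtain ⟨rm, hrm⟩ := findRow_attains_min a t
    obtain ⟨rM, hrM⟩ := findRow_attains_max a t
    have hsums : (a :: t).foldl (fun acc i => acc ++ [i.sum]) [] = a.sum :: t.map List.sum := by
      rw [sums_build]; simp
    have hB : find_alt (a :: t) =
        ((findRow (a :: t) (mnS a t)).getD [], (findRow (a :: t) (mxS a t)).getD [],
          mxS a t - mnS a t) := by
      show ((t.foldl stepB ((a, a.sum), (a, a.sum))).1.1, _, _) = _
      rw [← stateB_nil, loop_inv]
      simp [stateB]
    rw [hB]
    have hsm : rM.sum = mxS a t := findRow_some_sum _ _ _ hrM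
    have hsn : rm.sum = mnS a t := findRow_some_sum _ _ _ hrm
    simp only [find, hsums, PySem.List.max?_id_cons, PySem.List.min?_id_cons]
    have e1 : List.foldl min a.sum (t.map List.sum) = mnS a t := rfl
    have e2 : List.foldl max a.sum (t.map List.sum) = mxS a t := rfl
    rw [e1, e2, hrm, hrM]
    simp [hsm, hsn]
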